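-- pv_equiv track=rewrite | github.com/Stoneandbeach/snakecharmer | ex7_snakespeare.py | solution
-- ===== SOURCE A (Python) =====
-- def solution(sonnets):
--     # Note! This is definitely not the most reasonable algorithm to use!
--
--     # Setup dictionary
--     word_dict = dict()
--
--     # Setup variables to store words
--     w1, w2, w3 = "", "", ""
--
--     # Setup boolean to track whitespace
--     in_space = False
--
--     # Loop over the text character by character
--     for char in sonnets:
--         if char.isspace():
--             # Character is whitespace: we are in a space between words
--             in_space = True
--             # Keep going until we find the start of a new word
--             continue
--
--         else:
--             # Character is not whitespace, i.e. part of a word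
--             if in_space:
--                 # The previous character was whitespace
--                 # We have found a new word
--                 in_space = False
--
--                 if w1 != "" and w2 != "" and w3 != "":
--                     # All of w1, w2 and w3 are words
--
--                     if (w1, w2) not in word_dict.keys():
--                         # The dictionary does not yet have the key (w1, w2)
--                         word_dict[(w1, w2)] = list()
--
--                     # Add w3 to the list of words that can follow (w1, w2)
--                     word_dict[(w1, w2)].append(w3)
--
--                 # Move w2->w1, w3->w2 and reset w3 so it can start
--                 # collecting characters from the next word when a
--                 # non-space character is found
--                 w1, w2, w3 = w2, w3, ""
--
--             # Add this character to w3
--             w3 += char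
--
--     # Add the last w3 to the dictionary. This is necessary since in the
--     # loop, words are only added when the start of the next word is found.
--     # Therefore, the last word will not be added while looping.
--     if (w1, w2) not in word_dict.keys():
--         word_dict[(w1, w2)] = list()
--     word_dict[(w1, w2)].append(w3)
--
--     return word_dict
-- ===== SOURCE B (Python) =====
-- def solution(sonnets):
--     # One split, then a word-level sliding window: the whitespace tracking and
--     # character-by-character word assembly disappear, and setdefault replaces
--     # the hand-rolled key check. The window is flushed once more after the
--     # loop so the last trigram is recorded too.
--     word_dict = {}
--     w1, w2, w3 = "", "", ""
--     for w in sonnets.split():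
--         if w1 and w2 and w3:
--             word_dict.setdefault((w1, w2), []).append(w3)
--         w1, w2, w3 = w2, w3, w
--     word_dict.setdefault((w1, w2), []).append(w3)
--     return word_dict
-- ===== Notes on version B (the rewrite author's own statement) =====
-- stated objective: faster
-- what changed: Replaced the character-by-character whitespace state machine (in_space flag, per-character word assembly, hand-rolled key-membership check) by split() once and a word-level sliding-window loop using setdefault.
import Mathlib
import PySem

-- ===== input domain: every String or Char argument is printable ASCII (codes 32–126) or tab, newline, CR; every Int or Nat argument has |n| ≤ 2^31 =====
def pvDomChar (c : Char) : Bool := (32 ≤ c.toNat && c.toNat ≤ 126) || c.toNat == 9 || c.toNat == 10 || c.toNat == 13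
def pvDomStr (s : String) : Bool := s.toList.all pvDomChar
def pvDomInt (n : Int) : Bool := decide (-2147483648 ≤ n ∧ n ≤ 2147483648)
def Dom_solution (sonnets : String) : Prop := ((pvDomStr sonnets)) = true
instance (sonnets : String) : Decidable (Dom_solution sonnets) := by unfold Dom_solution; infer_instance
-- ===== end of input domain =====

-- B replaces A's character-by-character whitespace state machine by split()
-- plus a word-level sliding-window loop with setdefault (measured faster by
-- a timing run); same return value on every admitted input.


-- ===== PORT A =====
-- the dict carries words as List Char; pvConv renders it to the required String output type
def pvDictT : Type := PySem.Dict (List Char × List Char) (List (List Char))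

-- Python:  if (w1, w2) not in word_dict.keys(): word_dict[(w1, w2)] = list()
--          word_dict[(w1, w2)].append(w3)          (the in-place append is Dict.modify)
def pvAdd (d : pvDictT) (w1 w2 w3 : List Char) : pvDictT :=
  let d1 : pvDictT := if d.contains (w1, w2) then d else d.insert (w1, w2) []
  d1.modify (w1, w2) [] (· ++ [w3])

-- one character of A's loop, state = (word_dict, w1, w2, w3, in_space)
def pvStepA (st : pvDictT × List Char × List Char × List Char × Bool) (c : Char) :
    pvDictT × List Char × List Char × List Char × Bool :=
  let (d, w1, w2, w3, insp) := st
  if PySem.Chars.isspace c then (d, w1, w2, w3, true)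
  else if insp then
    let d' := if w1 ≠ [] ∧ w2 ≠ [] ∧ w3 ≠ [] then pvAdd d w1 w2 w3 else d
    (d', w2, w3, [] ++ [c], false)          -- w1,w2,w3 = w2,w3,"" ; then w3 += char
  else (d, w1, w2, w3 ++ [c], false)

def pvConv (d : pvDictT) : List (String × String × List String) :=
  d.items.map (fun p => (String.ofList p.1.1, String.ofList p.1.2, p.2.map String.ofList))

def solution (sonnets : String) : List (String × String × List String) :=
  let st := sonnets.toList.foldl pvStepA (PySem.Dict.empty, [], [], [], false)
  pvConv (pvAdd st.1 st.2.1 st.2.2.1 st.2.2.2.1)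

-- ===== PORT B =====
-- word_dict.setdefault((w1, w2), []).append(w3)
def pvStepB (d : pvDictT) (t : List Char × List Char × List Char) : pvDictT :=
  d.modify (t.1, t.2.1) [] (· ++ [t.2.2])

-- one word of B's loop, state = (word_dict, w1, w2, w3)
def pvStepW (st : pvDictT × List Char × List Char × List Char) (w : List Char) :
    pvDictT × List Char × List Char × List Char :=
  let (d, w1, w2, w3) := st
  let d' := if w1 ≠ [] ∧ w2 ≠ [] ∧ w3 ≠ [] then pvStepB d (w1, w2, w3) else d
  (d', w2, w3, w)

def solution_alt (sonnets : String) : List (String × String × List String) :=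
  let st := (PySem.Chars.split₀ sonnets.toList).foldl pvStepW (PySem.Dict.empty, [], [], [])
  pvConv (pvStepB st.1 (st.2.1, st.2.2.1, st.2.2.2))

-- ===== PRECONDITION & SPEC =====
def Spec_solution (sonnets : String) (out : List (String × String × List String)) : Prop :=
  out = solution_alt sonnets
instance (sonnets : String) (out : List (String × String × List String)) : Decidable (Spec_solution sonnets out) := by unfold Spec_solution; infer_instance

-- ===== CLAIM (what is proved, stated in full; the proofs are below) =====
def Claim_equal_solution : Prop := ∀ (sonnets : String), Dom_solution sonnets → Spec_solution sonnets (solution sonnets)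

-- ===== LEMMAS AND PROOFS =====
def pvProj (st : pvDictT × List Char × List Char × List Char × Bool) :
    pvDictT × List Char × List Char × List Char :=
  (st.1, st.2.1, st.2.2.1, st.2.2.2.1)

-- A's check-insert-append equals B's single setdefault-append (Dict.modify)
theorem pvAdd_eq_modify (d : pvDictT) (w1 w2 w3 : List Char) :
    pvAdd d w1 w2 w3 = PySem.Dict.modify d (w1, w2) [] (· ++ [w3]) := by
  unfold pvAdd
  by_cases h : d.contains (w1, w2)
  · simp [h]
  · have h' : d.contains (w1, w2) = false := by simpa using h
    rw [if_neg (by simp [h'])]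
    have hmem : ∀ p ∈ d.items, ¬ p.1 = (w1, w2) := by
      simpa [PySem.Dict.contains, List.any_eq_false] using h'
    have hf : List.find? (fun p => p.1 == (w1, w2)) d.items = none := by
      rw [List.find?_eq_none]; intro p hp; simpa using hmem p hp
    have hany : (d.items.any fun p => p.1 == (w1, w2)) = false := by
      simpa [PySem.Dict.contains] using h'
    apply PySem.Dict.ext
    simp only [PySem.Dict.modify, PySem.Dict.getD, PySem.Dict.get?, PySem.Dict.insert,
      PySem.Dict.contains, h', Bool.false_eq_true, if_false,
      List.find?_append, hf, Option.none_or, List.any_append, Bool.false_or, hany]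
    simp only [List.find?_cons, List.any_cons, List.any_nil, beq_self_eq_true, Bool.true_or,
      if_true, Option.map_some, Option.getD_some]
    simp only [List.map_append]
    rw [List.map_congr_left (fun p hp => if_neg (by simpa using hmem p hp))]
    simp

theorem pv_split_space (c : Char) (l : List Char) (h : PySem.Chars.isspace c = true) :
    PySem.Chars.split₀ (c :: l) = PySem.Chars.split₀ l := by
  simp [PySem.Chars.split₀, PySem.Chars.split₀.go, h]

theorem pv_go_append (l : List Char) : ∀ (cur : List Char) (acc : List (List Char)),
    PySem.Chars.split₀.go l cur acc = acc.reverse ++ PySem.Chars.split₀.go l cur [] := by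
  induction l with
  | nil => intro cur acc; by_cases h : cur.isEmpty <;> simp [PySem.Chars.split₀.go, h]
  | cons c rest ih =>
    intro cur acc
    by_cases hs : PySem.Chars.isspace c
    · by_cases hc : cur.isEmpty
      · simp only [PySem.Chars.split₀.go, hs, hc, if_true]
        exact ih [] acc
      · simp only [PySem.Chars.split₀.go, hs, hc, if_true, Bool.false_eq_true, if_false]
        rw [ih [] (cur.reverse :: acc), ih [] [cur.reverse]]
        simp
    · have hs' : PySem.Chars.isspace c = false := by simpa using hs
      simp only [PySem.Chars.split₀.go, hs', Bool.false_eq_true, if_false]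
      exact ih _ acc

theorem pv_go_word (l : List Char) : ∀ (cur : List Char), cur ≠ [] →
    PySem.Chars.split₀.go l cur [] =
      (cur.reverse ++ l.takeWhile (fun x => !PySem.Chars.isspace x)) ::
        PySem.Chars.split₀ (l.dropWhile (fun x => !PySem.Chars.isspace x)) := by
  induction l with
  | nil =>
    intro cur hc
    simp [PySem.Chars.split₀.go, PySem.Chars.split₀, List.isEmpty_iff, hc]
  | cons c rest ih =>
    intro cur hc
    by_cases hs : PySem.Chars.isspace c
    · rw [show PySem.Chars.split₀.go (c :: rest) cur [] =
            PySem.Chars.split₀.go rest [] [cur.reverse] from by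
          simp [PySem.Chars.split₀.go, hs, List.isEmpty_iff, hc], pv_go_append]
      have htake : List.takeWhile (fun x => !PySem.Chars.isspace x) (c :: rest) = [] := by
        simp [hs]
      have hdrop : List.dropWhile (fun x => !PySem.Chars.isspace x) (c :: rest) = c :: rest := by
        simp [hs]
      have h2 : PySem.Chars.split₀ (c :: rest) = PySem.Chars.split₀.go rest [] [] := by
        simp [PySem.Chars.split₀, PySem.Chars.split₀.go, hs]
      rw [htake, hdrop, List.append_nil, h2]
      simp
    · have hs' : PySem.Chars.isspace c = false := by simpa using hs
      simp only [PySem.Chars.split₀.go, hs', Bool.false_eq_true, if_false]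
      rw [ih (c :: cur) (by simp)]
      simp [hs']

theorem pv_split_word (c : Char) (l : List Char) (h : PySem.Chars.isspace c = false) :
    PySem.Chars.split₀ (c :: l) =
      (c :: l.takeWhile (fun x => !PySem.Chars.isspace x)) ::
        PySem.Chars.split₀ (l.dropWhile (fun x => !PySem.Chars.isspace x)) := by
  show PySem.Chars.split₀.go (c :: l) [] [] = _
  simp only [PySem.Chars.split₀.go, h, Bool.false_eq_true, if_false]
  rw [pv_go_word l [c] (by simp)]
  simp

-- the char-level machine of A, projected, is the word-level machine of B
theorem pv_char_word_aux (n : Nat) : ∀ (l : List Char), l.length ≤ n →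
    (∀ d w1 w2 w3, pvProj (l.foldl pvStepA (d, w1, w2, w3, true)) =
        (PySem.Chars.split₀ l).foldl pvStepW (d, w1, w2, w3)) ∧
    (∀ d w1 w2 cur, pvProj (l.foldl pvStepA (d, w1, w2, cur, false)) =
        (PySem.Chars.split₀ (l.dropWhile (fun x => !PySem.Chars.isspace x))).foldl pvStepW
          (d, w1, w2, cur ++ l.takeWhile (fun x => !PySem.Chars.isspace x))) := by
  induction n with
  | zero =>
    intro l hl
    have : l = [] := List.eq_nil_of_length_eq_zero (Nat.le_zero.mp hl)
    subst this
    constructor <;> intro d w1 w2 w3 <;>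
      simp [PySem.Chars.split₀, PySem.Chars.split₀.go, pvProj]
  | succ n ih =>
    intro l hl
    match l with
    | [] =>
      constructor <;> intro d w1 w2 w3 <;>
        simp [PySem.Chars.split₀, PySem.Chars.split₀.go, pvProj]
    | c :: rest =>
      simp only [List.length_cons, Nat.add_le_add_iff_right] at hl
      constructor
      · intro d w1 w2 w3
        by_cases hs : PySem.Chars.isspace c
        · rw [List.foldl_cons, show pvStepA (d, w1, w2, w3, true) c = (d, w1, w2, w3, true) from
            by simp [pvStepA, hs], (ih rest hl).1, pv_split_space c rest hs]
        · have hs' : PySem.Chars.isspace c = false := by simpa using hs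
          rw [List.foldl_cons, show pvStepA (d, w1, w2, w3, true) c =
              ((if w1 ≠ [] ∧ w2 ≠ [] ∧ w3 ≠ [] then pvAdd d w1 w2 w3 else d),
                w2, w3, [c], false) from by simp [pvStepA, hs'],
            (ih rest hl).2, pv_split_word c rest hs', List.foldl_cons]
          have : pvStepW (d, w1, w2, w3)
                (c :: List.takeWhile (fun x => !PySem.Chars.isspace x) rest)
              = ((if w1 ≠ [] ∧ w2 ≠ [] ∧ w3 ≠ [] then pvAdd d w1 w2 w3 else d), w2, w3,
                  c :: List.takeWhile (fun x => !PySem.Chars.isspace x) rest) := by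
            simp only [pvStepW, pvStepB, pvAdd_eq_modify]
          rw [List.singleton_append, this]
      · intro d w1 w2 cur
        by_cases hs : PySem.Chars.isspace c
        · rw [List.foldl_cons, show pvStepA (d, w1, w2, cur, false) c = (d, w1, w2, cur, true) from
            by simp [pvStepA, hs], (ih rest hl).1]
          have h1 : List.dropWhile (fun x => !PySem.Chars.isspace x) (c :: rest) = c :: rest := by
            simp [hs]
          have h2 : List.takeWhile (fun x => !PySem.Chars.isspace x) (c :: rest) = [] := by
            simp [hs]
          rw [h1, h2, pv_split_space c rest hs, List.append_nil]
        · have hs' : PySem.Chars.isspace c = false := by simpa using hs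
          rw [List.foldl_cons, show pvStepA (d, w1, w2, cur, false) c =
              (d, w1, w2, cur ++ [c], false) from by simp [pvStepA, hs'], (ih rest hl).2]
          have h1 : List.dropWhile (fun x => !PySem.Chars.isspace x) (c :: rest) =
              List.dropWhile (fun x => !PySem.Chars.isspace x) rest := by
            simp [hs']
          have h2 : List.takeWhile (fun x => !PySem.Chars.isspace x) (c :: rest) =
              c :: List.takeWhile (fun x => !PySem.Chars.isspace x) rest := by
            simp [hs']
          rw [h1, h2]
          simp

theorem pv_char_word_init (l : List Char) :
    pvProj (l.foldl pvStepA (PySem.Dict.empty, [], [], [], false)) =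
      (PySem.Chars.split₀ l).foldl pvStepW (PySem.Dict.empty, [], [], []) := by
  rw [(pv_char_word_aux l.length l le_rfl).2]
  match hl : l with
  | [] => simp [PySem.Chars.split₀, PySem.Chars.split₀.go]
  | c :: rest =>
    by_cases hs : PySem.Chars.isspace c
    · have h1 : List.dropWhile (fun x => !PySem.Chars.isspace x) (c :: rest) = c :: rest := by
        simp [hs]
      have h2 : List.takeWhile (fun x => !PySem.Chars.isspace x) (c :: rest) = [] := by
        simp [hs]
      rw [h1, h2, List.append_nil]
    · have hs' : PySem.Chars.isspace c = false := by simpa using hs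
      have h1 : List.dropWhile (fun x => !PySem.Chars.isspace x) (c :: rest) =
          List.dropWhile (fun x => !PySem.Chars.isspace x) rest := by simp [hs']
      have h2 : List.takeWhile (fun x => !PySem.Chars.isspace x) (c :: rest) =
          c :: List.takeWhile (fun x => !PySem.Chars.isspace x) rest := by simp [hs']
      rw [h1, h2, pv_split_word c rest hs', List.foldl_cons]
      rfl

-- ===== VERDICT (by name: the statement is the Claim_ definition above) =====
theorem solution_spec : Claim_equal_solution := by
  intro s _hDom
  show solution s = solution_alt s
  have h := pv_char_word_init s.toList
  have h1 := congrArg (fun q => q.1) h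
  have h2 := congrArg (fun q => q.2.1) h
  have h3 := congrArg (fun q => q.2.2.1) h
  have h4 := congrArg (fun q => q.2.2.2) h
  simp only [pvProj] at h1 h2 h3 h4
  show pvConv (pvAdd _ _ _ _) = _
  rw [h1, h2, h3, h4, pvAdd_eq_modify]
  rfl
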